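-- pv_equiv track=rewrite | github.com/danielmarinhom/obi | obi/2019/fase2/matriz.py | maior_submatriz_superlegal
-- ===== SOURCE A (Python) =====
-- def verificar_matriz_legal(matriz):
--     l, c = len(matriz), len(matriz[0])
--     for i in range(1, l):
--         for j in range(1, c):
--             if matriz[0][0] + matriz[i][j] > matriz[0][j] + matriz[i][0]:
--                 return False
--     return True
--
-- def maior_submatriz_superlegal(matriz):
--     L, C = len(matriz), len(matriz[0])
--     maior_area = 0
--
--     for l1 in range(L):
--         for l2 in range(l1 + 1, L):
--             for c1 in range(C):
--                 for c2 in range(c1 + 1, C):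
--                     submatriz = [row[c1:c2+1] for row in matriz[l1:l2+1]]
--                     if verificar_matriz_legal(submatriz):
--                         area = (l2 - l1 + 1) * (c2 - c1 + 1)
--                         maior_area = max(maior_area, area)
--
--     return maior_area
-- ===== SOURCE B (Python) =====
-- def maior_submatriz_superlegal(matriz):
--     L = len(matriz)
--     C = len(matriz[0])
--     best = 0
--     for l1 in range(L):
--         r0 = matriz[l1]
--         for c1 in range(C):
--             limit = C - 1
--             for l2 in range(l1 + 1, L):
--                 r = matriz[l2]
--                 j = c1 + 1
--                 while j <= limit and r0[c1] + r[j] <= r0[j] + r[c1]: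
--                     j += 1
--                 limit = j - 1
--                 if limit > c1:
--                     area = (l2 - l1 + 1) * (limit - c1 + 1)
--                     if area > best:
--                         best = area
--     return best
-- ===== Notes on version B (the rewrite author's own statement) =====
-- stated objective: faster
-- what changed: Replaces the quadruple loop that re-slices and re-verifies every submatrix (O(L^3 C^3)) by a per-(l1,c1) band scan that extends downward one row at a time, maintaining the running first-violation limit, so each (l1,c1,l2) triple costs one amortized column scan (O(L^2 C^2)).
import Mathlib
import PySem

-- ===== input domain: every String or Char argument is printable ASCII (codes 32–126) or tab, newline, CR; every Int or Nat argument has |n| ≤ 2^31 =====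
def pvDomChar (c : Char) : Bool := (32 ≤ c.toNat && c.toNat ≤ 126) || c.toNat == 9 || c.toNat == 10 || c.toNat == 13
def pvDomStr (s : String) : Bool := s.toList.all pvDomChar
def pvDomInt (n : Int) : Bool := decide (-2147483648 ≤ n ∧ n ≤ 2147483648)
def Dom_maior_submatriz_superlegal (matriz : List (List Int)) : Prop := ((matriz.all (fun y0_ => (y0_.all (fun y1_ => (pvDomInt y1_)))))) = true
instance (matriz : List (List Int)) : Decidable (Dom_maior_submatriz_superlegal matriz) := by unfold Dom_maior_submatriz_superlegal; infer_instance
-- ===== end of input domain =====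

-- B replaces A's quadruple loop over all submatrices (each re-sliced and re-verified)
-- by a per-(l1,c1) downward band scan carrying the running first-violation limit.
-- pyGetD with a default is used for indexing; inside Pre_ every index is in range, so it is exact.

-- m[i][j]
def pvCell (m : List (List Int)) (i j : Int) : Int :=
  PySem.List.pyGetD (PySem.List.pyGetD m i []) j 0

-- ===== PORT A =====
def verificar_matriz_legal (matriz : List (List Int)) : Bool :=
  let l : Int := matriz.length
  let c : Int := (PySem.List.pyGetD matriz 0 []).length
  (PySem.List.pyRange 1 l 1).all (fun i =>
    (PySem.List.pyRange 1 c 1).all (fun j =>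
      decide (pvCell matriz 0 0 + pvCell matriz i j ≤ pvCell matriz 0 j + pvCell matriz i 0)))

def maior_submatriz_superlegal (matriz : List (List Int)) : Int :=
  let L : Int := matriz.length
  let C : Int := (PySem.List.pyGetD matriz 0 []).length
  (PySem.List.pyRange 0 L 1).foldl (fun a l1 =>
    (PySem.List.pyRange (l1 + 1) L 1).foldl (fun a l2 =>
      (PySem.List.pyRange 0 C 1).foldl (fun a c1 =>
        (PySem.List.pyRange (c1 + 1) C 1).foldl (fun a c2 =>
          let sub := (PySem.List.slice matriz (some l1) (some (l2 + 1))).map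
            (fun row => PySem.List.slice row (some c1) (some (c2 + 1)))
          if verificar_matriz_legal sub then max a ((l2 - l1 + 1) * (c2 - c1 + 1)) else a)
          a) a) a) 0

-- ===== PORT B =====
-- the inner while loop of Source B
def pvScan (r0 r : List Int) (c1 j limit : Int) : Int :=
  if h : j ≤ limit ∧
      PySem.List.pyGetD r0 c1 0 + PySem.List.pyGetD r j 0 ≤
        PySem.List.pyGetD r0 j 0 + PySem.List.pyGetD r c1 0 then
    pvScan r0 r c1 (j + 1) limit
  else j
termination_by (limit + 1 - j).toNat
decreasing_by omega

-- the body of Source B's "for l2" loop: state is (limit, best)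
def pvBandStep (m : List (List Int)) (l1 c1 : Int) (st : Int × Int) (l2 : Int) : Int × Int :=
  let r := PySem.List.pyGetD m l2 []
  let j := pvScan (PySem.List.pyGetD m l1 []) r c1 (c1 + 1) st.1
  let limit := j - 1
  if limit > c1 then
    let area := (l2 - l1 + 1) * (limit - c1 + 1)
    (limit, if area > st.2 then area else st.2)
  else (limit, st.2)

def maior_submatriz_superlegal_alt (matriz : List (List Int)) : Int :=
  let L : Int := matriz.length
  let C : Int := (PySem.List.pyGetD matriz 0 []).length
  (PySem.List.pyRange 0 L 1).foldl (fun best l1 =>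
    (PySem.List.pyRange 0 C 1).foldl (fun best c1 =>
      ((PySem.List.pyRange (l1 + 1) L 1).foldl (pvBandStep matriz l1 c1) (C - 1, best)).2)
      best) 0

-- ===== PRECONDITION & SPEC =====
-- Pre_ excludes exactly the inputs on which A raises (empty matrix: IndexError on matriz[0];
-- and, when there are at least 2 rows and 2 columns, a row shorter than the first row, on which
-- the submatrix verification hits an IndexError), plus the measure-zero corner of such a short
-- row when the first row has fewer than 2 entries (there A returns 0 and B returns 0 as well).
def Pre_maior_submatriz_superlegal (matriz : List (List Int)) : Prop :=
  matriz ≠ [] ∧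
    (matriz.length ≤ 1 ∨ (PySem.List.pyGetD matriz 0 []).length ≤ 1 ∨
      ∀ row ∈ matriz, (PySem.List.pyGetD matriz 0 []).length ≤ row.length)
instance (matriz : List (List Int)) : Decidable (Pre_maior_submatriz_superlegal matriz) := by
  unfold Pre_maior_submatriz_superlegal; infer_instance

def pvWitness_maior_submatriz_superlegal : List (List Int) := [[1, 2], [3, 4]]

def Spec_maior_submatriz_superlegal (matriz : List (List Int)) (out : Int) : Prop := out = maior_submatriz_superlegal_alt matriz
instance (matriz : List (List Int)) (out : Int) : Decidable (Spec_maior_submatriz_superlegal matriz out) := by unfold Spec_maior_submatriz_superlegal; infer_instance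

-- ===== CLAIM (what is proved, stated in full; the proofs are below) =====
def Claim_equal_maior_submatriz_superlegal : Prop := ∀ (matriz : List (List Int)), Dom_maior_submatriz_superlegal matriz → Pre_maior_submatriz_superlegal matriz → Spec_maior_submatriz_superlegal matriz (maior_submatriz_superlegal matriz)

-- ===== LEMMAS AND PROOFS =====

-- legality of the pair of rows (l1, i) at columns (c1, j)
def pvOK (m : List (List Int)) (l1 c1 i j : Int) : Prop :=
  pvCell m l1 c1 + pvCell m i j ≤ pvCell m l1 j + pvCell m i c1

-- generic facts about running-max style folds over Int accumulators
lemma pvLeFold {α : Type} : ∀ (l : List α) (step : Int → α → Int),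
    (∀ a x, x ∈ l → a ≤ step a x) → ∀ a, a ≤ l.foldl step a := by
  intro l step
  induction l with
  | nil => intro _ a; simp
  | cons x t ih =>
    intro H a
    simp only [List.foldl_cons]
    exact le_trans (H a x (by simp)) (ih (fun a y hy => H a y (by simp [hy])) _)

lemma pvFoldLe {α : Type} : ∀ (l : List α) (step : Int → α → Int) (b : Int),
    (∀ a x, x ∈ l → a ≤ b → step a x ≤ b) → ∀ a, a ≤ b → l.foldl step a ≤ b := by
  intro l step b
  induction l with
  | nil => intro _ a ha; simpa using ha
  | cons x t ih =>
    intro H a ha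
    simp only [List.foldl_cons]
    exact ih (fun a y hy => H a y (by simp [hy])) _ (H a x (by simp) ha)

lemma pvReachFold {α : Type} (l : List α) (step : Int → α → Int) (c : Int) (x : α)
    (hx : x ∈ l) (Hinfl : ∀ a y, y ∈ l → a ≤ step a y) (Hc : ∀ a, c ≤ step a x) (a : Int) :
    c ≤ l.foldl step a := by
  obtain ⟨u, v, rfl⟩ := List.append_of_mem hx
  rw [List.foldl_append, List.foldl_cons]
  exact le_trans (Hc _) (pvLeFold v step (fun a y hy => Hinfl a y (by simp [hy])) _)

lemma pvStep_ge (a x : Int) (cnd : Prop) [Decidable cnd] : a ≤ if cnd then max a x else a := by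
  split_ifs
  · exact le_max_left a x
  · exact le_rfl

-- while-loop (pvScan) characterisation
lemma pvScan_ge (r0 r : List Int) (c1 j limit : Int) : j ≤ pvScan r0 r c1 j limit := by
  fun_induction pvScan <;> omega

lemma pvScan_le (r0 r : List Int) (c1 j limit : Int) :
    pvScan r0 r c1 j limit ≤ max j (limit + 1) := by
  fun_induction pvScan <;> omega

lemma pvScan_cond (r0 r : List Int) (c1 j limit : Int) :
    ∀ k, j ≤ k → k < pvScan r0 r c1 j limit →
      k ≤ limit ∧ PySem.List.pyGetD r0 c1 0 + PySem.List.pyGetD r k 0 ≤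
        PySem.List.pyGetD r0 k 0 + PySem.List.pyGetD r c1 0 := by
  fun_induction pvScan with
  | case1 _ h ih =>
    intro k hk1 hk2
    rcases eq_or_lt_of_le hk1 with rfl | hlt
    · exact h
    · exact ih k (by omega) hk2
  | case2 _ h =>
    intro k hk1 hk2
    omega

lemma pvScan_min (r0 r : List Int) (c1 j limit : Int) :
    ∀ k, j ≤ k + 1 →
      (∀ t, j ≤ t → t ≤ k → t ≤ limit ∧ PySem.List.pyGetD r0 c1 0 + PySem.List.pyGetD r t 0 ≤
        PySem.List.pyGetD r0 t 0 + PySem.List.pyGetD r c1 0) →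
      k + 1 ≤ pvScan r0 r c1 j limit := by
  fun_induction pvScan with
  | case1 jc h ih =>
    intro k hk H
    by_cases hjk : jc ≤ k
    · exact ih k (by omega) (fun t ht1 ht2 => H t (by omega) ht2)
    · have := pvScan_ge r0 r c1 (jc + 1) limit; omega
  | case2 jc h =>
    intro k hk H
    by_cases hjk : jc ≤ k
    · exact absurd (H jc le_rfl hjk) h
    · omega

-- the band fold never decreases the best component
lemma pvBand_infl (m : List (List Int)) (l1 c1 : Int) :
    ∀ (l2s : List Int) (lim best : Int),
      best ≤ (l2s.foldl (pvBandStep m l1 c1) (lim, best)).2 := by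
  intro l2s
  induction l2s with
  | nil => intro lim best; simp
  | cons a t ih =>
    intro lim best
    simp only [List.foldl_cons, pvBandStep]
    split_ifs with h1 h2
    · exact le_trans (le_of_lt h2) (ih _ _)
    · exact ih _ _
    · exact ih _ _

-- every area the band fold records is the area of a legal in-range submatrix
lemma pvBand_le (m : List (List Int)) (l1 c1 Cc bnd b : Int) (hc1C : c1 ≤ Cc - 1)
    (Hbnd : ∀ l2 c2, l1 < l2 → l2 < b → c1 < c2 → c2 ≤ Cc - 1 →
        (∀ i, l1 < i → i ≤ l2 → ∀ jj, c1 < jj → jj ≤ c2 → pvOK m l1 c1 i jj) →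
        (l2 - l1 + 1) * (c2 - c1 + 1) ≤ bnd) :
    ∀ (n : Nat) (a lim best : Int), (b - a).toNat = n → l1 < a → best ≤ bnd → lim ≤ Cc - 1 →
      (∀ i, l1 < i → i < a → ∀ jj, c1 < jj → jj ≤ lim → pvOK m l1 c1 i jj) →
      ((PySem.List.pyRange a b 1).foldl (pvBandStep m l1 c1) (lim, best)).2 ≤ bnd := by
  intro n
  induction n with
  | zero =>
    intro a lim best hn ha hb hl hinv
    rw [PySem.List.pyRange_one_eq_nil (by omega)]
    simpa using hb
  | succ n ih =>
    intro a lim best hn ha hb hl hinv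
    rw [PySem.List.pyRange_one_cons (by omega), List.foldl_cons]
    simp only [pvBandStep]
    have hge := pvScan_ge (PySem.List.pyGetD m l1 []) (PySem.List.pyGetD m a []) c1 (c1 + 1) lim
    have hle := pvScan_le (PySem.List.pyGetD m l1 []) (PySem.List.pyGetD m a []) c1 (c1 + 1) lim
    have hcond := pvScan_cond (PySem.List.pyGetD m l1 []) (PySem.List.pyGetD m a []) c1 (c1 + 1) lim
    set j := pvScan (PySem.List.pyGetD m l1 []) (PySem.List.pyGetD m a []) c1 (c1 + 1) lim with hj
    have hlim' : j - 1 ≤ Cc - 1 := by omega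
    have hinv' : ∀ i, l1 < i → i < a + 1 → ∀ jj, c1 < jj → jj ≤ j - 1 → pvOK m l1 c1 i jj := by
      intro i hi1 hi2 jj hjj1 hjj2
      by_cases hia : i = a
      · subst hia
        have := hcond jj (by omega) (by omega)
        simpa [pvOK, pvCell] using this.2
      · exact hinv i hi1 (by omega) jj hjj1 (by omega)
    split_ifs with hgt h2
    · have harea := Hbnd a (j - 1) ha (by omega) hgt hlim'
        (fun i h1 h2' jj h3 h4 => hinv' i h1 (by omega) jj h3 h4)
      exact ih (a + 1) (j - 1) _ (by omega) (by omega) harea hlim' hinv'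
    · exact ih (a + 1) (j - 1) best (by omega) (by omega) hb hlim' hinv'
    · exact ih (a + 1) (j - 1) best (by omega) (by omega) hb hlim' hinv'

-- a legal in-range submatrix's area is reached by the band fold
lemma pvBand_reach (m : List (List Int)) (l1 c1 l2 c2 b : Int)
    (hc : c1 < c2) (hl : l1 < l2) (hb : l2 < b) :
    ∀ (n : Nat) (a lim best : Int), (b - a).toNat = n → a ≤ l2 → c2 ≤ lim →
      (∀ i, a ≤ i → i ≤ l2 → ∀ jj, c1 < jj → jj ≤ c2 → pvOK m l1 c1 i jj) →
      (l2 - l1 + 1) * (c2 - c1 + 1) ≤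
        ((PySem.List.pyRange a b 1).foldl (pvBandStep m l1 c1) (lim, best)).2 := by
  intro n
  induction n with
  | zero => intro a lim best hn ha hc2 hinv; exact absurd hn (by omega)
  | succ n ih =>
    intro a lim best hn ha hc2 hinv
    rw [PySem.List.pyRange_one_cons (by omega), List.foldl_cons]
    simp only [pvBandStep]
    have hmin := pvScan_min (PySem.List.pyGetD m l1 []) (PySem.List.pyGetD m a []) c1 (c1 + 1) lim
      c2 (by omega)
      (fun t ht1 ht2 => ⟨by omega, by
        have := hinv a le_rfl ha t (by omega) (by omega)
        simpa [pvOK, pvCell] using this⟩)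
    set j := pvScan (PySem.List.pyGetD m l1 []) (PySem.List.pyGetD m a []) c1 (c1 + 1) lim with hj
    rw [if_pos (by omega : j - 1 > c1)]
    by_cases hal : a = l2
    · rw [← hal]
      have h1 : (a - l1 + 1) * (c2 - c1 + 1) ≤ (a - l1 + 1) * (j - 1 - c1 + 1) :=
        mul_le_mul_of_nonneg_left (by omega) (by omega)
      have h2 : (a - l1 + 1) * (j - 1 - c1 + 1) ≤
          (if (a - l1 + 1) * (j - 1 - c1 + 1) > best then (a - l1 + 1) * (j - 1 - c1 + 1)
           else best) := by
        split_ifs with hc3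
        · exact le_rfl
        · omega
      exact le_trans (le_trans h1 h2) (pvBand_infl m l1 c1 _ _ _)
    · exact ih (a + 1) (j - 1) _ (by omega) (by omega) (by omega)
        (fun i h1 h2 => hinv i (by omega) h2)

-- indexing into the sliced submatrix
lemma pvSub_row (m : List (List Int)) (l1 l2 c1 c2 i : Int)
    (h0 : 0 ≤ l1) (h2L : l2 < (m.length : Int)) (hi0 : 0 ≤ i) (hi : i ≤ l2 - l1) :
    PySem.List.pyGetD ((PySem.List.slice m (some l1) (some (l2 + 1))).map
        (fun row => PySem.List.slice row (some c1) (some (c2 + 1)))) i [] =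
      PySem.List.slice (PySem.List.pyGetD m (l1 + i) []) (some c1) (some (c2 + 1)) := by
  rw [PySem.List.slice_toNat m h0 (by omega)]
  have hlen : (((m.drop l1.toNat).take ((l2 + 1).toNat - l1.toNat)).map
      (fun row => PySem.List.slice row (some c1) (some (c2 + 1)))).length
      = (l2 + 1).toNat - l1.toNat := by
    simp only [List.length_map, List.length_take, List.length_drop]
    omega
  rw [PySem.List.pyGetD_eq_getElem _ _ hi0 (by rw [hlen]; omega)]
  rw [PySem.List.pyGetD_eq_getElem _ _ (by omega : (0:Int) ≤ l1 + i) (by omega)]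
  simp only [List.getElem_map, List.getElem_take, List.getElem_drop]
  have hidx : l1.toNat + i.toNat = (l1 + i).toNat := by omega
  simp [hidx]

lemma pvCell_sub (m : List (List Int)) (l1 l2 c1 c2 i j : Int)
    (h0 : 0 ≤ l1) (h2L : l2 < (m.length : Int)) (hc0 : 0 ≤ c1)
    (hc2C : c2 < ((PySem.List.pyGetD m 0 []).length : Int))
    (hrows : ∀ row ∈ m, (PySem.List.pyGetD m 0 []).length ≤ row.length)
    (hi0 : 0 ≤ i) (hi : i ≤ l2 - l1) (hj0 : 0 ≤ j) (hj : j ≤ c2 - c1) :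
    pvCell ((PySem.List.slice m (some l1) (some (l2 + 1))).map
        (fun row => PySem.List.slice row (some c1) (some (c2 + 1)))) i j
      = pvCell m (l1 + i) (c1 + j) := by
  unfold pvCell
  rw [pvSub_row m l1 l2 c1 c2 i h0 h2L hi0 hi]
  have hmem : PySem.List.pyGetD m (l1 + i) [] ∈ m := by
    rw [PySem.List.pyGetD_eq_getElem _ _ (by omega) (by omega)]
    exact List.getElem_mem _
  have hrow : (PySem.List.pyGetD m 0 []).length ≤ (PySem.List.pyGetD m (l1 + i) []).length :=
    hrows _ hmem
  rw [PySem.List.slice_toNat _ hc0 (by omega)]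
  have hlen2 : (((PySem.List.pyGetD m (l1 + i) []).drop c1.toNat).take
      ((c2 + 1).toNat - c1.toNat)).length = (c2 + 1).toNat - c1.toNat := by
    simp only [List.length_take, List.length_drop]
    omega
  rw [PySem.List.pyGetD_eq_getElem _ _ hj0 (by rw [hlen2]; omega)]
  rw [PySem.List.pyGetD_eq_getElem _ _ (by omega : (0:Int) ≤ c1 + j) (by omega)]
  simp only [List.getElem_take, List.getElem_drop]
  have hidx : c1.toNat + j.toNat = (c1 + j).toNat := by omega
  simp [hidx]

-- A's legality check on the sliced submatrix, characterised on the original matrix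
lemma pvVerificar_iff (m : List (List Int)) (l1 l2 c1 c2 : Int)
    (h0 : 0 ≤ l1) (h12 : l1 < l2) (h2L : l2 < (m.length : Int))
    (hc0 : 0 ≤ c1) (hc12 : c1 < c2) (hc2C : c2 < ((PySem.List.pyGetD m 0 []).length : Int))
    (hrows : ∀ row ∈ m, (PySem.List.pyGetD m 0 []).length ≤ row.length) :
    (verificar_matriz_legal ((PySem.List.slice m (some l1) (some (l2 + 1))).map
        (fun row => PySem.List.slice row (some c1) (some (c2 + 1)))) = true)
      ↔ ∀ i, l1 < i → i ≤ l2 → ∀ j, c1 < j → j ≤ c2 → pvOK m l1 c1 i j := by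
  have hsubLen : (((PySem.List.slice m (some l1) (some (l2 + 1))).map
      (fun row => PySem.List.slice row (some c1) (some (c2 + 1)))).length : Int)
      = l2 + 1 - l1 := by
    rw [PySem.List.slice_toNat m h0 (by omega)]
    simp only [List.length_map, List.length_take, List.length_drop]
    omega
  have hrow0 : (PySem.List.pyGetD m 0 []).length ≤ (PySem.List.pyGetD m (l1 + 0) []).length := by
    refine hrows _ ?_
    rw [PySem.List.pyGetD_eq_getElem _ _ (by omega) (by omega)]
    exact List.getElem_mem _
  have hsub0 : ((PySem.List.pyGetD ((PySem.List.slice m (some l1) (some (l2 + 1))).map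
      (fun row => PySem.List.slice row (some c1) (some (c2 + 1)))) 0 []).length : Int)
      = c2 + 1 - c1 := by
    rw [pvSub_row m l1 l2 c1 c2 0 h0 h2L le_rfl (by omega)]
    rw [PySem.List.slice_toNat _ hc0 (by omega)]
    simp only [List.length_take, List.length_drop]
    omega
  unfold verificar_matriz_legal
  simp only [List.all_eq_true, PySem.List.mem_pyRange_one, decide_eq_true_eq, hsubLen, hsub0]
  constructor
  · intro H i hi1 hi2 jj hj1 hj2
    have := H (i - l1) ⟨by omega, by omega⟩ (jj - c1) ⟨by omega, by omega⟩
    rw [pvCell_sub m l1 l2 c1 c2 0 0 h0 h2L hc0 hc2C hrows le_rfl (by omega) le_rfl (by omega),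
      pvCell_sub m l1 l2 c1 c2 (i - l1) (jj - c1) h0 h2L hc0 hc2C hrows (by omega) (by omega) (by omega) (by omega),
      pvCell_sub m l1 l2 c1 c2 0 (jj - c1) h0 h2L hc0 hc2C hrows le_rfl (by omega) (by omega) (by omega),
      pvCell_sub m l1 l2 c1 c2 (i - l1) 0 h0 h2L hc0 hc2C hrows (by omega) (by omega) le_rfl (by omega)] at this
    have e1 : l1 + (i - l1) = i := by omega
    have e2 : c1 + (jj - c1) = jj := by omega
    rw [e1, e2, add_zero, add_zero] at this
    exact this
  · intro H i hi jj hj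
    rw [pvCell_sub m l1 l2 c1 c2 0 0 h0 h2L hc0 hc2C hrows le_rfl (by omega) le_rfl (by omega),
      pvCell_sub m l1 l2 c1 c2 i jj h0 h2L hc0 hc2C hrows (by omega) (by omega) (by omega) (by omega),
      pvCell_sub m l1 l2 c1 c2 0 jj h0 h2L hc0 hc2C hrows le_rfl (by omega) (by omega) (by omega),
      pvCell_sub m l1 l2 c1 c2 i 0 h0 h2L hc0 hc2C hrows (by omega) (by omega) le_rfl (by omega)]
    rw [add_zero, add_zero]
    exact H (l1 + i) (by omega) (by omega) (c1 + jj) (by omega) (by omega)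

-- the two main inequalities
lemma pvA_le_B (m : List (List Int))
    (hrows : 2 ≤ m.length → 2 ≤ (PySem.List.pyGetD m 0 []).length →
      ∀ row ∈ m, (PySem.List.pyGetD m 0 []).length ≤ row.length) :
    maior_submatriz_superlegal m ≤ maior_submatriz_superlegal_alt m := by
  have hB0 : (0 : Int) ≤ maior_submatriz_superlegal_alt m := by
    simp only [maior_submatriz_superlegal_alt]
    exact pvLeFold _ _ (fun a l1 _ =>
      pvLeFold _ _ (fun a c1 _ => pvBand_infl m l1 c1 _ _ _) a) 0
  simp only [maior_submatriz_superlegal]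
  refine pvFoldLe _ _ _ ?_ 0 hB0
  intro a l1 hm1 ha
  rw [PySem.List.mem_pyRange_one] at hm1
  refine pvFoldLe _ _ _ ?_ a ha
  intro a l2 hm2 ha
  rw [PySem.List.mem_pyRange_one] at hm2
  refine pvFoldLe _ _ _ ?_ a ha
  intro a c1 hm3 ha
  rw [PySem.List.mem_pyRange_one] at hm3
  refine pvFoldLe _ _ _ ?_ a ha
  intro a c2 hm4 ha
  rw [PySem.List.mem_pyRange_one] at hm4
  split_ifs with hv
  · refine max_le ha ?_
    have hrec : ∀ row ∈ m, (PySem.List.pyGetD m 0 []).length ≤ row.length :=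
      hrows (by omega) (by omega)
    have hleg := (pvVerificar_iff m l1 l2 c1 c2 (by omega) (by omega) (by omega)
      (by omega) (by omega) (by omega) hrec).mp hv
    simp only [maior_submatriz_superlegal_alt]
    refine pvReachFold _ _ _ l1 (PySem.List.mem_pyRange_one.mpr ⟨by omega, by omega⟩)
      (fun a y _ => pvLeFold _ _ (fun a c1' _ => pvBand_infl m y c1' _ _ _) a) ?_ 0
    intro bestA
    refine pvReachFold _ _ _ c1 (PySem.List.mem_pyRange_one.mpr ⟨by omega, by omega⟩)
      (fun bb cc _ => pvBand_infl m l1 cc _ _ _) ?_ bestA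
    intro bestB
    exact pvBand_reach m l1 c1 l2 c2 (m.length : Int) (by omega) (by omega) (by omega)
      (((m.length : Int) - (l1 + 1)).toNat) (l1 + 1)
      (((PySem.List.pyGetD m 0 []).length : Int) - 1) bestB rfl (by omega) (by omega)
      (fun i h1 h2 jj h3 h4 => hleg i (by omega) h2 jj h3 h4)
  · exact ha

lemma pvB_le_A (m : List (List Int))
    (hrows : 2 ≤ m.length → 2 ≤ (PySem.List.pyGetD m 0 []).length →
      ∀ row ∈ m, (PySem.List.pyGetD m 0 []).length ≤ row.length) :
    maior_submatriz_superlegal_alt m ≤ maior_submatriz_superlegal m := by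
  have hA0 : (0 : Int) ≤ maior_submatriz_superlegal m := by
    simp only [maior_submatriz_superlegal]
    exact pvLeFold _ _ (fun a l1 _ => pvLeFold _ _ (fun a l2 _ =>
      pvLeFold _ _ (fun a c1 _ => pvLeFold _ _ (fun a c2 _ => pvStep_ge a _ _) a) a) a) 0
  simp only [maior_submatriz_superlegal_alt]
  refine pvFoldLe _ _ _ ?_ 0 hA0
  intro best l1 hm1 hbest
  rw [PySem.List.mem_pyRange_one] at hm1
  refine pvFoldLe _ _ _ ?_ best hbest
  intro best' c1 hm2 hbest'
  rw [PySem.List.mem_pyRange_one] at hm2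
  refine pvBand_le m l1 c1 ((PySem.List.pyGetD m 0 []).length : Int)
    (maior_submatriz_superlegal m) (m.length : Int) (by omega) ?_
    (((m.length : Int) - (l1 + 1)).toNat) (l1 + 1)
    (((PySem.List.pyGetD m 0 []).length : Int) - 1) best' rfl (by omega) hbest' (by omega)
    (fun i h1 h2 => absurd h2 (by omega))
  intro l2 c2 h1 h2 h3 h4 hleg
  have hrec : ∀ row ∈ m, (PySem.List.pyGetD m 0 []).length ≤ row.length :=
    hrows (by omega) (by omega)
  have hv := (pvVerificar_iff m l1 l2 c1 c2 (by omega) h1 h2 (by omega) h3 (by omega)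
    hrec).mpr hleg
  simp only [maior_submatriz_superlegal]
  refine pvReachFold _ _ _ l1 (PySem.List.mem_pyRange_one.mpr ⟨by omega, by omega⟩)
    (fun a y _ => pvLeFold _ _ (fun a l2' _ => pvLeFold _ _ (fun a c1' _ =>
      pvLeFold _ _ (fun a c2' _ => pvStep_ge a _ _) a) a) a) ?_ 0
  intro a0
  refine pvReachFold _ _ _ l2 (PySem.List.mem_pyRange_one.mpr ⟨by omega, by omega⟩)
    (fun a y _ => pvLeFold _ _ (fun a c1' _ =>
      pvLeFold _ _ (fun a c2' _ => pvStep_ge a _ _) a) a) ?_ a0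
  intro a1
  refine pvReachFold _ _ _ c1 (PySem.List.mem_pyRange_one.mpr ⟨by omega, by omega⟩)
    (fun a y _ => pvLeFold _ _ (fun a c2' _ => pvStep_ge a _ _) a) ?_ a1
  intro a2
  refine pvReachFold _ _ _ c2 (PySem.List.mem_pyRange_one.mpr ⟨by omega, by omega⟩)
    (fun a y _ => pvStep_ge a _ _) ?_ a2
  intro a3
  simp only [hv, if_true]
  exact le_max_right _ _

-- ===== VERDICT (by name: the statement is the Claim_ definition above) =====
theorem maior_submatriz_superlegal_spec : Claim_equal_maior_submatriz_superlegal := by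
  intro m hdom hpre
  unfold Spec_maior_submatriz_superlegal
  have hrows : 2 ≤ m.length → 2 ≤ (PySem.List.pyGetD m 0 []).length →
      ∀ row ∈ m, (PySem.List.pyGetD m 0 []).length ≤ row.length := by
    intro h2 h2'
    rcases hpre.2 with h | h | h
    · omega
    · omega
    · exact h
  exact le_antisymm (pvA_le_B m hrows) (pvB_le_A m hrows)
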